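-- pv_equiv track=rewrite | github.com/JamesDarby345/labels_2D_to_3D | 2d3d_ppm.py | generate_chunks
-- ===== SOURCE A (Python) =====
-- def generate_chunks(width: int, height: int, chunk_size: int):
--     """Generate (start_x, end_x, start_y, end_y) coordinates for chunks"""
--     chunks = []
--     for y in range(0, height, chunk_size):
--         for x in range(0, width, chunk_size):
--             chunks.append((
--                 x,
--                 min(x + chunk_size, width),
--                 y,
--                 min(y + chunk_size, height)
--             ))
--     return chunks
-- ===== SOURCE B (Python) =====
-- def _num_chunks(length: int, chunk_size: int) -> int:
--     """Number of chunks range(0, length, chunk_size) produces: ceil-division, clamped at 0."""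
--     return max(0, -(-length // chunk_size))
--
--
-- def generate_chunks(width: int, height: int, chunk_size: int):
--     """Generate (start_x, end_x, start_y, end_y) coordinates for chunks"""
--     nx = _num_chunks(width, chunk_size)
--     ny = _num_chunks(height, chunk_size)
--     chunks = []
--     for k in range(nx * ny):
--         x = (k % nx) * chunk_size
--         y = (k // nx) * chunk_size
--         chunks.append((x, min(x + chunk_size, width), y, min(y + chunk_size, height)))
--     return chunks
-- ===== Notes on version B (the rewrite author's own statement) =====
-- stated objective: alternative
-- what changed: Replaces the nested range-driven double loop by a single flat loop over a closed-form chunk count (ceiling division per axis), recovering each chunk's grid position from the flat index with divmod arithmetic.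
import Mathlib
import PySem

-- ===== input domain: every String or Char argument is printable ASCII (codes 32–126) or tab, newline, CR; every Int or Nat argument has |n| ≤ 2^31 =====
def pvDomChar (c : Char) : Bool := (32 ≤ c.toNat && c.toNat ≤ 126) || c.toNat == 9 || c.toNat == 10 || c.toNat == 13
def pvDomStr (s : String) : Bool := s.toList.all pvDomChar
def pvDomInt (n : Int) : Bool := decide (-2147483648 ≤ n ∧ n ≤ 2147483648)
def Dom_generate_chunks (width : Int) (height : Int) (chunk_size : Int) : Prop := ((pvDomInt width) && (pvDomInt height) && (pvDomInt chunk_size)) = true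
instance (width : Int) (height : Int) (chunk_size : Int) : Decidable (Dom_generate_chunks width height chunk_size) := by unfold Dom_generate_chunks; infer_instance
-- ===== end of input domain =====

-- B replaces A's nested range loops by one flat loop over a closed-form chunk count, recovering grid positions by divmod; same values.
-- ===== PORT A =====
def generate_chunks (width : Int) (height : Int) (chunk_size : Int) : List (Int × Int × Int × Int) :=
  (PySem.List.pyRange 0 height chunk_size).foldl (fun chunks y =>
    (PySem.List.pyRange 0 width chunk_size).foldl (fun chunks x =>
      chunks ++ [(x, min (x + chunk_size) width, y, min (y + chunk_size) height)]) chunks) []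

-- ===== PORT B =====
-- max(0, -(-length // chunk_size)): number of chunks along one axis (ceiling division, clamped at 0)
def pvNumChunks (length : Int) (chunk_size : Int) : Int :=
  max 0 (-(PySem.Int.floordiv (-length) chunk_size))

def generate_chunks_alt (width : Int) (height : Int) (chunk_size : Int) : List (Int × Int × Int × Int) :=
  let nx := pvNumChunks width chunk_size
  let ny := pvNumChunks height chunk_size
  (PySem.List.pyRange 0 (nx * ny) 1).map (fun k =>
    let x := (PySem.Int.mod k nx) * chunk_size
    let y := (PySem.Int.floordiv k nx) * chunk_size
    (x, min (x + chunk_size) width, y, min (y + chunk_size) height))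

-- ===== PRECONDITION & SPEC =====
-- Pre_ excludes chunk_size = 0, on which Python's range (A) raises ValueError (and B's division raises ZeroDivisionError).
def Pre_generate_chunks (width : Int) (height : Int) (chunk_size : Int) : Prop := chunk_size ≠ 0
instance (width : Int) (height : Int) (chunk_size : Int) : Decidable (Pre_generate_chunks width height chunk_size) := by unfold Pre_generate_chunks; infer_instance
def pvWitness_generate_chunks : Int × Int × Int := (5, 3, 2)
def Spec_generate_chunks (width : Int) (height : Int) (chunk_size : Int) (out : List (Int × Int × Int × Int)) : Prop := out = generate_chunks_alt width height chunk_size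
instance (width : Int) (height : Int) (chunk_size : Int) (out : List (Int × Int × Int × Int)) : Decidable (Spec_generate_chunks width height chunk_size out) := by unfold Spec_generate_chunks; infer_instance

-- ===== CLAIM =====
def Claim_equal_generate_chunks : Prop := ∀ (width : Int) (height : Int) (chunk_size : Int), Dom_generate_chunks width height chunk_size → Pre_generate_chunks width height chunk_size → Spec_generate_chunks width height chunk_size (generate_chunks width height chunk_size)

-- ===== LEMMAS AND PROOFS =====

-- For a positive step, B's clamped ceiling-division count equals pyRange's internal count.
lemma numChunks_eq_count_pos (L c : Int) (hc : 0 < c) :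
    pvNumChunks L c = if 0 < L then (L + c - 1) / c else 0 := by
  unfold pvNumChunks
  rw [PySem.Int.floordiv_eq_ediv_of_pos hc]
  have hdm : c * ((-L) / c) + (-L) % c = -L := Int.mul_ediv_add_emod (-L) c
  have hr0 : 0 ≤ (-L) % c := Int.emod_nonneg _ (by omega)
  have hrc : (-L) % c < c := Int.emod_lt_of_pos _ hc
  set q := (-L) / c with hq
  set r := (-L) % c with hr
  by_cases hL : 0 < L
  · have hLq : L + c - 1 = (c - 1 - r) + (-q) * c := by
      have : (-q) * c = -(c * q) := by ring
      omega
    rw [if_pos hL, hLq, Int.add_mul_ediv_right _ _ (by omega : c ≠ 0),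
        Int.ediv_eq_zero_of_lt (by omega) (by omega), zero_add]
    have hqneg : q ≤ 0 := by
      by_contra hpos
      have : 0 < c * q := mul_pos hc (by omega)
      omega
    omega
  · have hqnn : 0 ≤ q := Int.ediv_nonneg (by omega) (by omega)
    rw [if_neg hL]
    omega

-- range(0, L, c) is the list [c*0, c*1, …] of length pvNumChunks L c.
lemma pyRange_zero_eq (L c : Int) (hc : c ≠ 0) :
    PySem.List.pyRange 0 L c = (List.range (pvNumChunks L c).toNat).map (fun k : Nat => c * (k : Int)) := by
  simp only [PySem.List.pyRange, if_neg hc, sub_zero, zero_sub, zero_add]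
  by_cases hcp : 0 < c
  · rw [if_pos hcp, numChunks_eq_count_pos L c hcp]
    split_ifs with h <;> simp
  · have hcn : 0 < -c := by omega
    have hflip : pvNumChunks L c = pvNumChunks (-L) (-c) := by
      unfold pvNumChunks
      rw [PySem.Int.floordiv_neg_neg (-L) c]
    rw [if_neg hcp, hflip, numChunks_eq_count_pos (-L) (-c) hcn]
    split_ifs with h1 h2 <;> first | rfl | omega

-- Flat index loop over range (m*n) with divmod = nested grid traversal (j outer, i inner).
lemma range_mul_map_divmod {α : Type} (m n : Nat) (g : Nat → Nat → α) :
    (List.range (m * n)).map (fun k => g (k % n) (k / n)) =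
    (List.range m).flatMap (fun j => (List.range n).map (fun i => g i j)) := by
  induction m with
  | zero => simp
  | succ m ih =>
    rw [Nat.succ_mul, List.range_add, List.map_append, ih, List.range_succ,
        List.flatMap_append, List.map_map]
    congr 1
    simp only [List.flatMap_cons, List.flatMap_nil, List.append_nil]
    apply List.map_congr_left
    intro i hi
    have hin : i < n := List.mem_range.mp hi
    have hn : 0 < n := by omega
    simp only [Function.comp_apply]
    rw [show m * n + i = n * m + i by ring, Nat.mul_add_mod, Nat.mod_eq_of_lt hin,
        Nat.mul_add_div hn, Nat.div_eq_of_lt hin, Nat.add_zero]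

-- ===== VERDICT =====
theorem generate_chunks_spec : Claim_equal_generate_chunks := by
  intro width height chunk_size _ hpre
  unfold Pre_generate_chunks at hpre
  unfold Spec_generate_chunks generate_chunks generate_chunks_alt
  simp only [PySem.List.foldl_append_singleton_eq_map, PySem.List.foldl_append_eq_flatMap,
    List.nil_append]
  rw [pyRange_zero_eq width chunk_size hpre, pyRange_zero_eq height chunk_size hpre]
  set nxN := (pvNumChunks width chunk_size).toNat with hnx
  set nyN := (pvNumChunks height chunk_size).toNat with hny
  have hx : pvNumChunks width chunk_size = (nxN : Int) :=
    (Int.toNat_of_nonneg (le_max_left _ _)).symm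
  have hy : pvNumChunks height chunk_size = (nyN : Int) :=
    (Int.toNat_of_nonneg (le_max_left _ _)).symm
  have hnn : pvNumChunks width chunk_size * pvNumChunks height chunk_size
      = ((nxN * nyN : Nat) : Int) := by rw [hx, hy]; push_cast; ring
  rw [hnn, PySem.List.pyRange_zero_nat, List.map_map, List.flatMap_map]
  simp only [List.map_map, Function.comp_def, hx, PySem.Int.mod_natCast,
    PySem.Int.floordiv_natCast]
  rw [Nat.mul_comm nxN nyN]
  have key := range_mul_map_divmod nyN nxN (fun i j =>
    (((i : Nat) : Int) * chunk_size,
     min (((i : Nat) : Int) * chunk_size + chunk_size) width,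
     (((j : Nat) : Int) * chunk_size,
      min (((j : Nat) : Int) * chunk_size + chunk_size) height)))
  simp only [] at key
  rw [key]
  simp [mul_comm]
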